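-- pv_equiv track=rewrite | github.com/dkoutavas/rf_luv | spectrum/feature_extractor.py | run_length_bursts_s
-- ===== SOURCE A (Python) =====
-- def run_length_bursts_s(actives: list[bool], interval_s: int) -> list[float]:
--     """Run-length encode a boolean activity series into burst durations in seconds.
--
--     Quantization caveat: a 5 s voice burst on a bin sampled every 5 min will be
--     reported as a ~300 s burst. Documented in the spec as accepted — the classifier
--     (step 3) should not over-rely on burst duration for non-airband bins.
--     """
--     bursts = []
--     run = 0
--     for a in actives:
--         if a:
--             run += 1
--         else:
--             if run > 0:
--                 bursts.append(run * interval_s)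
--                 run = 0
--     if run > 0:
--         bursts.append(run * interval_s)
--     return bursts
-- ===== SOURCE B (Python) =====
-- def run_length_bursts_s(actives: list[bool], interval_s: int) -> list[float]:
--     """Separator-gap form: collect the indices of all inactive bins (with -1 and
--     len(actives) as sentinels); each maximal True run is exactly the gap between
--     two consecutive separator indices, of length (b - a - 1)."""
--     seps = [-1] + [i for i, a in enumerate(actives) if not a] + [len(actives)]
--     return [(b - a - 1) * interval_s for a, b in zip(seps, seps[1:]) if b - a > 1]
-- ===== Notes on version B (the rewrite author's own statement) =====
-- stated objective: alternative
-- what changed: Instead of a resettable running counter, B first collects the index list of all False positions (with -1/len sentinels) and then derives each burst as the gap between consecutive separator indices via zip-pairing; runs are computed from separator positions in two staged passes, no incremental run state.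
import Mathlib
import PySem

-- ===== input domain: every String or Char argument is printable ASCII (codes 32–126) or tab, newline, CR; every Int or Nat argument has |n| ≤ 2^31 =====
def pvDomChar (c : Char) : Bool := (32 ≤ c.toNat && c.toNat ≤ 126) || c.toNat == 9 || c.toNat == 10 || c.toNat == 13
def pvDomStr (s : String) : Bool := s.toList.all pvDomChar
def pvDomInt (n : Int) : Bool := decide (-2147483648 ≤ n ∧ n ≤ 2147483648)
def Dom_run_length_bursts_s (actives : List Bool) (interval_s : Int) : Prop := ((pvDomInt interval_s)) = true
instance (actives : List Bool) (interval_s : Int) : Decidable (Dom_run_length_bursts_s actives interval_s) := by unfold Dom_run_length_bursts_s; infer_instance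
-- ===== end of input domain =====

-- B replaces A's resettable running counter with a staged separator-gap computation:
-- collect the indices of all False bins (plus -1/len sentinels), then derive each burst
-- as the gap between consecutive separator indices; alternative decomposition, same cost.

-- ===== PORT A =====
def run_length_bursts_s (actives : List Bool) (interval_s : Int) : List Int :=
  let r := actives.foldl
    (fun (st : List Int × Int) a =>
      let bursts := st.1
      let run := st.2
      if a then (bursts, run + 1)
      else if run > 0 then (bursts ++ [run * interval_s], 0)
      else (bursts, run))
    ([], 0)
  if r.2 > 0 then r.1 ++ [r.2 * interval_s] else r.1

-- ===== PORT B =====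
def run_length_bursts_s_alt (actives : List Bool) (interval_s : Int) : List Int :=
  -- seps = [-1] + [i for i, a in enumerate(actives) if not a] + [len(actives)]
  let seps : List Int :=
    [-1] ++ ((PySem.List.enumerate actives 0).filterMap
      (fun p => if !p.2 then some p.1 else none)) ++ [(actives.length : Int)]
  -- [(b - a - 1) * interval_s for a, b in zip(seps, seps[1:]) if b - a > 1]
  (seps.zip (PySem.List.slice seps (some 1) none)).filterMap
    (fun p => if p.2 - p.1 > 1 then some ((p.2 - p.1 - 1) * interval_s) else none)

-- ===== PRECONDITION & SPEC =====
def Spec_run_length_bursts_s (actives : List Bool) (interval_s : Int) (out : List Int) : Prop := out = run_length_bursts_s_alt actives interval_s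
instance (actives : List Bool) (interval_s : Int) (out : List Int) : Decidable (Spec_run_length_bursts_s actives interval_s out) := by unfold Spec_run_length_bursts_s; infer_instance

-- ===== CLAIM (what is proved, stated in full; the proofs are below) =====
def Claim_equal_run_length_bursts_s : Prop := ∀ (actives : List Bool) (interval_s : Int), Dom_run_length_bursts_s actives interval_s → Spec_run_length_bursts_s actives interval_s (run_length_bursts_s actives interval_s)

-- ===== LEMMAS AND PROOFS =====

-- A's loop body, named
def stepA (interval_s : Int) (st : List Int × Int) (a : Bool) : List Int × Int :=
  if a then (st.1, st.2 + 1)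
  else if st.2 > 0 then (st.1 ++ [st.2 * interval_s], 0)
  else (st.1, st.2)

-- recursive form of B's zip-pair pass
def pairBursts (iv : Int) : List Int → List Int
  | a :: b :: rest =>
      (if b - a > 1 then [(b - a - 1) * iv] else []) ++ pairBursts iv (b :: rest)
  | _ => []

-- recursive form of B's separator-index pass
def falseIdxs (i : Int) : List Bool → List Int
  | [] => []
  | a :: xs => if a then falseIdxs (i + 1) xs else i :: falseIdxs (i + 1) xs

theorem enum_filter (xs : List Bool) (i : Int) :
    (PySem.List.enumerate xs i).filterMap (fun p => if !p.2 then some p.1 else none)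
      = falseIdxs i xs := by
  induction xs generalizing i with
  | nil => simp [PySem.List.enumerate_nil, falseIdxs]
  | cons a xs ih =>
    rw [PySem.List.enumerate_cons, List.filterMap_cons, ih]
    cases a <;> simp [falseIdxs]

theorem zip_tail_filterMap (iv : Int) (l : List Int) :
    (l.zip l.tail).filterMap
      (fun p => if p.2 - p.1 > 1 then some ((p.2 - p.1 - 1) * iv) else none)
      = pairBursts iv l := by
  induction l with
  | nil => rfl
  | cons a l ih =>
    cases l with
    | nil => rfl
    | cons b rest =>
      rw [pairBursts]
      simp only [List.tail_cons, List.zip_cons_cons, List.filterMap_cons]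
      rw [← ih]
      split_ifs <;> simp

theorem pairBursts_cons_cons (iv a b : Int) (l : List Int) :
    pairBursts iv (a :: b :: l)
      = (if b - a > 1 then [(b - a - 1) * iv] else []) ++ pairBursts iv (b :: l) := by
  rw [pairBursts]

theorem key (iv : Int) :
    ∀ (xs : List Bool) (bursts : List Int) (i prev : Int), prev < i →
      (let r := xs.foldl (stepA iv) (bursts, i - prev - 1)
       if r.2 > 0 then r.1 ++ [r.2 * iv] else r.1)
        = bursts ++ pairBursts iv (prev :: (falseIdxs i xs ++ [i + (xs.length : Int)])) := by
  intro xs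
  induction xs with
  | nil =>
    intro bursts i prev h
    simp only [List.foldl_nil, falseIdxs, List.nil_append, List.length_nil,
      Int.natCast_zero, add_zero]
    rw [show (prev :: [i]) = prev :: i :: ([] : List Int) from rfl, pairBursts_cons_cons,
        show pairBursts iv [i] = [] from rfl]
    by_cases hp : 0 < i - prev - 1
    · rw [if_pos hp, if_pos (by omega : i - prev > 1)]; simp
    · rw [if_neg hp, if_neg (by omega : ¬ i - prev > 1)]; simp
  | cons a rest ih =>
    intro bursts i prev h
    have hlen : (i + 1) + (rest.length : Int) = i + ((a :: rest).length : Int) := by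
      simp [List.length_cons]; omega
    cases a with
    | true =>
      have hs : stepA iv (bursts, i - prev - 1) true = (bursts, i - prev - 1 + 1) := by
        simp [stepA]
      have ihx := ih bursts (i + 1) prev (by omega)
      rw [show (i + 1) - prev - 1 = i - prev - 1 + 1 from by omega, hlen,
          show falseIdxs (i + 1) rest = falseIdxs i (true :: rest) from rfl] at ihx
      rw [List.foldl_cons, hs]
      exact ihx
    | false =>
      have hfi : falseIdxs i (false :: rest) = i :: falseIdxs (i + 1) rest := rfl
      by_cases hpos : 0 < i - prev - 1
      · have hs : stepA iv (bursts, i - prev - 1) false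
            = (bursts ++ [(i - prev - 1) * iv], 0) := by
          simp [stepA]; omega
        have ihx := ih (bursts ++ [(i - prev - 1) * iv]) (i + 1) i (by omega)
        rw [show (i + 1) - i - 1 = (0 : Int) from by omega, hlen] at ihx
        rw [List.foldl_cons, hs, ihx, hfi]
        simp only [List.cons_append, pairBursts_cons_cons,
          if_pos (by omega : i - prev > 1)]
        simp
      · have hs : stepA iv (bursts, i - prev - 1) false = (bursts, 0) := by
          have : i - prev - 1 = 0 := by omega
          simp [stepA, this]
        have ihx := ih bursts (i + 1) i (by omega)
        rw [show (i + 1) - i - 1 = (0 : Int) from by omega, hlen] at ihx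
        rw [List.foldl_cons, hs, ihx, hfi]
        simp only [List.cons_append, pairBursts_cons_cons,
          if_neg (by omega : ¬ i - prev > 1)]
        simp

theorem ports_eq (actives : List Bool) (interval_s : Int) :
    run_length_bursts_s actives interval_s = run_length_bursts_s_alt actives interval_s := by
  unfold run_length_bursts_s run_length_bursts_s_alt
  have hA : (fun (st : List Int × Int) (a : Bool) =>
      if a then (st.1, st.2 + 1)
      else if st.2 > 0 then (st.1 ++ [st.2 * interval_s], 0)
      else (st.1, st.2)) = stepA interval_s := by
    funext st a; simp [stepA]
  simp only [hA, PySem.List.slice_from_one, zip_tail_filterMap, enum_filter]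
  have := key interval_s actives [] 0 (-1) (by omega)
  simp only [show (0 : Int) - (-1) - 1 = 0 from rfl] at this
  rw [this]
  simp only [List.nil_append, List.cons_append]
  norm_num

-- ===== VERDICT (by name: the statement is the Claim_ definition above) =====
theorem run_length_bursts_s_spec : Claim_equal_run_length_bursts_s := by
  intro actives interval_s _
  unfold Spec_run_length_bursts_s
  exact ports_eq actives interval_s
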